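-- pv_equiv track=rewrite | github.com/hushaoqi/MIS_project | 源程序/15.1配送中心选址/5-D6/main.py | gen_check
-- ===== SOURCE A (Python) =====
-- def gen_check(gen, n):
--     for i in range(len(gen)):
--         if gen[i] >= n:
--             return False
--         else:
--             for j in range(i + 1, len(gen)):
--                 if gen[i] == gen[j]:
--                     return False
--                 else:
--                     pass
--     return True
-- ===== SOURCE B (Python) =====
-- def gen_check(gen, n):
--     s = sorted(gen)
--     if s and s[-1] >= n:
--         return False
--     for i in range(len(s) - 1):
--         if s[i] == s[i + 1]:
--             return False
--     return True
-- ===== Notes on version B (the rewrite author's own statement) =====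
-- stated objective: alternative
-- what changed: Replaces the nested quadratic bound+duplicate scan with sort-then-single-adjacency-pass: bound check via the sorted maximum, duplicates via adjacent equality.
import Mathlib
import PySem

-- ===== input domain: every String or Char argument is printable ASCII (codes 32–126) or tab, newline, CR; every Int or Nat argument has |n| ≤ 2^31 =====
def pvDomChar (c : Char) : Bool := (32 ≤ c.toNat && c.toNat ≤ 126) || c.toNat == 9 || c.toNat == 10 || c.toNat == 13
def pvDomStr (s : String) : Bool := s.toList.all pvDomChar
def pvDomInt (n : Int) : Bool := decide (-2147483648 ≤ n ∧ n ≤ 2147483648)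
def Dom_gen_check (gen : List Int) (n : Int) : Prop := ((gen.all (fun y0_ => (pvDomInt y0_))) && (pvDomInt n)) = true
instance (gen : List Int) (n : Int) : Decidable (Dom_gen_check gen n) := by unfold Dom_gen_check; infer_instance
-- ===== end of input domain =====

-- B replaces A's nested bound+duplicate scan by a sort followed by one adjacency pass (alternative algorithm; return value only, neither mutates its argument).

-- ===== PORT A =====
-- inner loop: 'for j in range(i+1, len(gen)): if gen[i] == gen[j]: return False'
def gen_check_inner (x : Int) : List Int → Bool
  | [] => true
  | y :: ys => if x == y then false else gen_check_inner x ys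

def gen_check (gen : List Int) (n : Int) : Bool :=
  match gen with
  | [] => true
  | x :: xs =>
    if x ≥ n then false
    else if gen_check_inner x xs then gen_check xs n else false

-- ===== PORT B =====
-- 'for i in range(len(s)-1): if s[i] == s[i+1]: return False'
def gen_check_adj : List Int → Bool
  | [] => true
  | [_] => true
  | x :: y :: r => if x == y then false else gen_check_adj (y :: r)

def gen_check_alt (gen : List Int) (n : Int) : Bool :=
  match PySem.List.sorted gen (fun x => x) false with
  | [] => true
  | a :: t =>
    if (a :: t).getLast (by simp) ≥ n then false
    else gen_check_adj (a :: t)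

-- ===== PRECONDITION & SPEC =====
def Spec_gen_check (gen : List Int) (n : Int) (out : Bool) : Prop := out = gen_check_alt gen n
instance (gen : List Int) (n : Int) (out : Bool) : Decidable (Spec_gen_check gen n out) := by unfold Spec_gen_check; infer_instance

-- ===== CLAIM (what is proved, stated in full; the proofs are below) =====
def Claim_equal_gen_check : Prop := ∀ (gen : List Int) (n : Int), Dom_gen_check gen n → Spec_gen_check gen n (gen_check gen n)

-- ===== LEMMAS AND PROOFS =====

theorem gen_check_inner_iff (x : Int) (xs : List Int) :
    gen_check_inner x xs = true ↔ x ∉ xs := by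
  induction xs with
  | nil => simp [gen_check_inner]
  | cons y ys ih =>
    by_cases h : x = y <;> simp [gen_check_inner, h, ih]

theorem gen_check_iff (gen : List Int) (n : Int) :
    gen_check gen n = true ↔ (∀ x ∈ gen, x < n) ∧ gen.Nodup := by
  induction gen with
  | nil => simp [gen_check]
  | cons x xs ih =>
    by_cases hx : x ≥ n
    · simp only [gen_check, if_pos hx]
      constructor
      · intro h; exact absurd h (by simp)
      · rintro ⟨hall, -⟩
        exact absurd (hall x (by simp)) (by omega)
    · by_cases hin : x ∈ xs
      · have : gen_check_inner x xs = false := by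
          cases h : gen_check_inner x xs
          · rfl
          · exact absurd ((gen_check_inner_iff x xs).mp h) (by simp [hin])
        simp only [gen_check, if_neg hx, this]
        constructor
        · intro h; exact absurd h (by simp)
        · rintro ⟨-, hnd⟩
          exact absurd hin (List.nodup_cons.mp hnd).1
      · have : gen_check_inner x xs = true := (gen_check_inner_iff x xs).mpr hin
        simp only [gen_check, if_neg hx, this, if_true]
        rw [ih]
        constructor
        · rintro ⟨hall, hnd⟩
          refine ⟨?_, List.nodup_cons.mpr ⟨hin, hnd⟩⟩
          intro y hy
          rcases List.mem_cons.mp hy with rfl | hy'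
          · omega
          · exact hall y hy'
        · rintro ⟨hall, hnd⟩
          exact ⟨fun y hy => hall y (by simp [hy]), (List.nodup_cons.mp hnd).2⟩

theorem gen_check_adj_iff (l : List Int) :
    gen_check_adj l = true ↔ List.IsChain (· ≠ ·) l := by
  induction l with
  | nil => simp [gen_check_adj]
  | cons x t ih =>
    cases t with
    | nil => simp [gen_check_adj]
    | cons y r =>
      by_cases h : x = y <;>
        simp [gen_check_adj, h, ih, List.isChain_cons_cons]

theorem le_getLast_of_pairwise (a : Int) (t : List Int)
    (hp : (a :: t).Pairwise (· ≤ ·)) :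
    ∀ y ∈ a :: t, y ≤ (a :: t).getLast (by simp) := by
  induction t generalizing a with
  | nil => simp
  | cons b r ih =>
    intro y hy
    have hp' : (b :: r).Pairwise (· ≤ ·) := (List.pairwise_cons.mp hp).2
    have hab : ∀ z ∈ b :: r, a ≤ z := (List.pairwise_cons.mp hp).1
    rcases List.mem_cons.mp hy with rfl | hy
    · have := ih b hp' b (by simp)
      have hlast : (y :: b :: r).getLast (by simp) = (b :: r).getLast (by simp) :=
        List.getLast_cons (by simp)
      rw [hlast]
      exact le_trans (hab b (by simp)) this
    · have := ih b hp' y hy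
      rw [List.getLast_cons (by simp)]
      exact this

theorem chain_lt_of_chain_ne (l : List Int)
    (hpw : l.Pairwise (· ≤ ·)) (hch : List.IsChain (· ≠ ·) l) :
    List.IsChain (· < ·) l := by
  induction l with
  | nil => exact List.IsChain.nil
  | cons x t ih =>
    cases t with
    | nil => exact List.IsChain.singleton x
    | cons y r =>
      rw [List.isChain_cons_cons] at hch ⊢
      refine ⟨lt_of_le_of_ne ((List.pairwise_cons.mp hpw).1 y (by simp)) hch.1, ?_⟩
      exact ih (List.pairwise_cons.mp hpw).2 hch.2

theorem gen_check_alt_iff (gen : List Int) (n : Int) :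
    gen_check_alt gen n = true ↔ (∀ x ∈ gen, x < n) ∧ gen.Nodup := by
  unfold gen_check_alt
  have hperm : (PySem.List.sorted gen (fun x => x) false).Perm gen :=
    PySem.List.sorted_perm gen (fun x => x) false
  have hpw : (PySem.List.sorted gen (fun x => x) false).Pairwise (· ≤ ·) := by
    have := PySem.List.sorted_pairwise gen (fun x => x)
    simpa using this
  cases hs : PySem.List.sorted gen (fun x => x) false with
  | nil =>
    have hgen : gen = [] := ((hs ▸ hperm).symm).eq_nil
    simp [hgen]
  | cons a t =>
    rw [hs] at hperm hpw
    by_cases hlast : (a :: t).getLast (by simp) ≥ n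
    · simp only [ge_iff_le, if_pos hlast]
      constructor
      · intro h; exact absurd h (by simp)
      · rintro ⟨hall, -⟩
        have hmem : (a :: t).getLast (by simp) ∈ gen :=
          hperm.mem_iff.mp (List.getLast_mem _)
        exact absurd (hall _ hmem) (by omega)
    · simp only [ge_iff_le, if_neg hlast]
      rw [gen_check_adj_iff]
      constructor
      · intro hch
        have hlt : List.IsChain (· < ·) (a :: t) :=
          chain_lt_of_chain_ne (a :: t) hpw hch
        have hnd : (a :: t).Nodup :=
          ((List.isChain_iff_pairwise.mp hlt).imp ne_of_lt)
        refine ⟨?_, hperm.symm.nodup_iff.mpr hnd⟩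
        intro y hy
        have := le_getLast_of_pairwise a t hpw y (hperm.symm.mem_iff.mp hy)
        omega
      · rintro ⟨-, hnd⟩
        have : (a :: t).Nodup := hperm.nodup_iff.mpr hnd
        exact this.isChain

-- ===== VERDICT (by name: the statement is the Claim_ definition above) =====
theorem gen_check_spec : Claim_equal_gen_check := by
  intro gen n _
  unfold Spec_gen_check
  rw [Bool.eq_iff_iff, gen_check_iff, gen_check_alt_iff]
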